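-- pv_equiv track=rewrite | github.com/xiroV/Apriori | apriori.py | one_itemsets
-- ===== SOURCE A (Python) =====
-- def one_itemsets(database):
--     result = []
--
--     for itemset in database:
--         for item in itemset:
--             if item not in result:
--                 result.append(item)
--
--     result.sort()
--     return result
-- ===== SOURCE B (Python) =====
-- def one_itemsets(database):
--     items = []
--     for itemset in database:
--         items.extend(itemset)
--     items.sort()
--     result = []
--     for x in items:
--         if not result or result[-1] != x:
--             result.append(x)
--     return result
-- ===== Notes on version B (the rewrite author's own statement) =====
-- stated objective: faster
-- what changed: Replaces A's quadratic membership-test dedup (item not in result, rechecked against the growing result list) with flatten + sort + one linear adjacent-comparison pass that keeps an element only when it differs from the last kept one.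
import Mathlib
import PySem

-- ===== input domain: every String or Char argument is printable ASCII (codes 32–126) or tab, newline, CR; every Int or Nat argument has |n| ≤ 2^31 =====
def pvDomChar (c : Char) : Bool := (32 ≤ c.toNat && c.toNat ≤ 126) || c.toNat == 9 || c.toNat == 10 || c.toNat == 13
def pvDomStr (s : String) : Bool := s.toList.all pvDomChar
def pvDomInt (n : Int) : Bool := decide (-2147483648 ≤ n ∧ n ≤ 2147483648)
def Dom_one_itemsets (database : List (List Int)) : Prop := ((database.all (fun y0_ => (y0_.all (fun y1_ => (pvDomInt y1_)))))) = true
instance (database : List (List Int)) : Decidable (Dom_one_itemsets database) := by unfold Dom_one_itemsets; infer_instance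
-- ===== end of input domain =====

-- B replaces A's quadratic membership-test dedup by flatten + sort + one adjacent-comparison pass (alternative algorithm, same result).

-- ===== PORT A =====
def one_itemsets (database : List (List Int)) : List Int :=
  let result := database.foldl (fun result itemset =>
      itemset.foldl (fun result item =>
        if item ∈ result then result else result ++ [item]) result) []
  PySem.List.sorted result (fun x => x) false

-- ===== PORT B =====
def one_itemsets_alt (database : List (List Int)) : List Int :=
  let items := database.foldl (fun acc itemset => acc ++ itemset) []
  let sortedItems := PySem.List.sorted items (fun x => x) false
  sortedItems.foldl (fun result x =>
    if result.getLast? ≠ some x then result ++ [x] else result) []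

-- ===== PRECONDITION & SPEC =====
def Spec_one_itemsets (database : List (List Int)) (out : List Int) : Prop := out = one_itemsets_alt database
instance (database : List (List Int)) (out : List Int) : Decidable (Spec_one_itemsets database out) := by unfold Spec_one_itemsets; infer_instance

-- ===== CLAIM (what is proved, stated in full; the proofs are below) =====
def Claim_equal_one_itemsets : Prop := ∀ (database : List (List Int)), Dom_one_itemsets database → Spec_one_itemsets database (one_itemsets database)

-- ===== LEMMAS AND PROOFS =====

-- recursive description of B's adjacent-dedup loop
def ddA : Option Int → List Int → List Int
  | _, [] => []
  | last, x :: xs => if last = some x then ddA last xs else x :: ddA (some x) xs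

theorem ddA_bridge (xs : List Int) : ∀ (acc : List Int),
    xs.foldl (fun result x => if result.getLast? ≠ some x then result ++ [x] else result) acc
      = acc ++ ddA acc.getLast? xs := by
  induction xs with
  | nil => intro acc; simp [ddA]
  | cons x xs ih =>
    intro acc
    by_cases h : acc.getLast? = some x
    · rw [List.foldl_cons, if_neg (by simp [h]), ih acc, h, ddA, if_pos rfl]
    · simp only [List.foldl_cons, ddA, ne_eq, h, not_false_eq_true, if_pos]
      rw [ih (acc ++ [x]), List.getLast?_concat, List.append_assoc]
      rfl

theorem ddA_mem (xs : List Int) (hs : xs.Pairwise (· ≤ ·)) :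
    ∀ (last : Option Int), (∀ l, last = some l → ∀ y ∈ xs, l ≤ y) →
    ∀ y, y ∈ ddA last xs ↔ (y ∈ xs ∧ some y ≠ last) := by
  induction xs with
  | nil => intro last _ y; simp [ddA]
  | cons x xs ih =>
    intro last hb y
    have hrel : ∀ z ∈ xs, x ≤ z := (List.pairwise_cons.mp hs).1
    have hstail : xs.Pairwise (· ≤ ·) := (List.pairwise_cons.mp hs).2
    by_cases h : last = some x
    · subst h
      rw [ddA, if_pos rfl]
      rw [ih hstail (some x) (by intro l hl z hz; cases hl; exact hrel z hz) y]
      constructor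
      · rintro ⟨hy, hne⟩; exact ⟨List.mem_cons_of_mem _ hy, hne⟩
      · rintro ⟨hy, hne⟩
        rcases List.mem_cons.mp hy with rfl | hy'
        · exact absurd rfl hne
        · exact ⟨hy', hne⟩
    · rw [ddA, if_neg h]
      rw [List.mem_cons, ih hstail (some x) (by intro l hl z hz; cases hl; exact hrel z hz) y]
      constructor
      · rintro (rfl | ⟨hy, hne⟩)
        · refine ⟨List.mem_cons_self, ?_⟩
          intro hc; exact h hc.symm
        · refine ⟨List.mem_cons_of_mem _ hy, ?_⟩
          intro hc
          rcases last with _ | l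
          · cases hc
          · obtain rfl : y = l := Option.some.inj hc
            have hl : y ≤ x := hb y rfl x List.mem_cons_self
            have hx : x ≤ y := hrel y hy
            exact h (by rw [le_antisymm hx hl])
      · rintro ⟨hy, hne⟩
        rcases List.mem_cons.mp hy with rfl | hy'
        · exact Or.inl rfl
        · by_cases hyx : y = x
          · exact Or.inl hyx
          · exact Or.inr ⟨hy', by simpa using hyx⟩

theorem ddA_pairwise (xs : List Int) (hs : xs.Pairwise (· ≤ ·)) :
    ∀ (last : Option Int), (ddA last xs).Pairwise (· < ·) := by
  induction xs with
  | nil => intro last; simp [ddA]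
  | cons x xs ih =>
    intro last
    have hrel : ∀ z ∈ xs, x ≤ z := (List.pairwise_cons.mp hs).1
    have hstail : xs.Pairwise (· ≤ ·) := (List.pairwise_cons.mp hs).2
    by_cases h : last = some x
    · rw [ddA, if_pos h]; exact ih hstail last
    · rw [ddA, if_neg h]
      refine List.pairwise_cons.mpr ⟨?_, ih hstail (some x)⟩
      intro y hy
      have := (ddA_mem xs hstail (some x)
        (by intro l hl z hz; cases hl; exact hrel z hz) y).mp hy
      exact lt_of_le_of_ne (hrel y this.1) (by simpa using this.2.symm)

-- A's inner loop
theorem memA_inner (xs : List Int) : ∀ (acc : List Int) (y : Int),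
    y ∈ xs.foldl (fun r i => if i ∈ r then r else r ++ [i]) acc ↔ y ∈ acc ∨ y ∈ xs := by
  induction xs with
  | nil => intro acc y; simp
  | cons x xs ih =>
    intro acc y
    by_cases h : x ∈ acc
    · rw [List.foldl_cons, if_pos h, ih acc y]
      constructor
      · rintro (hy | hy)
        · exact Or.inl hy
        · exact Or.inr (List.mem_cons_of_mem _ hy)
      · rintro (hy | hy)
        · exact Or.inl hy
        · rcases List.mem_cons.mp hy with rfl | hy'
          · exact Or.inl h
          · exact Or.inr hy'
    · rw [List.foldl_cons, if_neg h, ih (acc ++ [x]) y]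
      simp [List.mem_append, or_assoc]

theorem nodupA_inner (xs : List Int) : ∀ (acc : List Int), acc.Nodup →
    (xs.foldl (fun r i => if i ∈ r then r else r ++ [i]) acc).Nodup := by
  induction xs with
  | nil => intro acc h; simpa
  | cons x xs ih =>
    intro acc h
    by_cases hx : x ∈ acc
    · rw [List.foldl_cons, if_pos hx]; exact ih acc h
    · rw [List.foldl_cons, if_neg hx]
      exact ih (acc ++ [x]) (h.append (List.nodup_singleton x) (by simpa using hx))

theorem memA_outer (db : List (List Int)) : ∀ (acc : List Int) (y : Int),
    y ∈ db.foldl (fun r s => s.foldl (fun r i => if i ∈ r then r else r ++ [i]) r) acc ↔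
      y ∈ acc ∨ y ∈ db.flatten := by
  induction db with
  | nil => intro acc y; simp
  | cons s db ih =>
    intro acc y
    rw [List.foldl_cons, ih, memA_inner]
    simp [or_assoc]

theorem nodupA_outer (db : List (List Int)) : ∀ (acc : List Int), acc.Nodup →
    (db.foldl (fun r s => s.foldl (fun r i => if i ∈ r then r else r ++ [i]) r) acc).Nodup := by
  induction db with
  | nil => intro acc h; simpa
  | cons s db ih =>
    intro acc h
    rw [List.foldl_cons]
    exact ih _ (nodupA_inner s acc h)

theorem flatB (db : List (List Int)) : ∀ (acc : List Int),
    db.foldl (fun a s => a ++ s) acc = acc ++ db.flatten := by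
  induction db with
  | nil => intro acc; simp
  | cons s db ih => intro acc; rw [List.foldl_cons, ih, List.flatten_cons, List.append_assoc]

-- ===== VERDICT (by name: the statement is the Claim_ definition above) =====
theorem one_itemsets_spec : Claim_equal_one_itemsets := by
  intro db _
  unfold Spec_one_itemsets one_itemsets one_itemsets_alt
  simp only []
  set accA := db.foldl (fun r s => s.foldl (fun r i => if i ∈ r then r else r ++ [i]) r) [] with haccA
  rw [flatB db []]
  simp only [List.nil_append]
  set sf := PySem.List.sorted db.flatten (fun x => x) false with hsf
  have hsp : sf.Pairwise (· ≤ ·) := by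
    have := PySem.List.sorted_pairwise (xs := db.flatten) (key := fun x : Int => x)
    simpa using this
  rw [ddA_bridge sf []]
  simp only [List.getLast?_nil, List.nil_append]
  set D := ddA none sf with hD
  have hDlt : D.Pairwise (· < ·) := ddA_pairwise sf hsp none
  have hDmem : ∀ y, y ∈ D ↔ y ∈ db.flatten := by
    intro y
    rw [hD, ddA_mem sf hsp none (by intro l hl; cases hl)]
    simp [hsf, PySem.List.mem_sorted]
  have hAmem : ∀ y, y ∈ accA ↔ y ∈ db.flatten := by
    intro y; rw [haccA, memA_outer]; simp
  have hAnd : accA.Nodup := nodupA_outer db [] (by simp)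
  have hDnd : D.Nodup := hDlt.imp (fun h => ne_of_lt h)
  have hperm : D.Perm accA := by
    rw [List.perm_ext_iff_of_nodup hDnd hAnd]
    intro y; rw [hDmem y, hAmem y]
  exact PySem.List.sorted_eq_of_perm_of_pairwise_lt accA D (fun x => x) hperm (by simpa using hDlt)
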